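-- pv_equiv track=rewrite | github.com/martinthuriaux/SIKE_Example | FindingPointsInE.py | sqrt_fp2_all
-- ===== SOURCE A (Python) =====
-- def mul_fp2(a, b, p):
--     """
--     Multiply two F_{p^2} elements a=(a0,a1), b=(b0,b1),
--     where i^2 = -1 mod p, i.e.
--       (a0 + a1*i)*(b0 + b1*i)
--     = (a0*b0 - a1*b1) + (a0*b1 + a1*b0)*i.
--     """
--     (a0, a1) = a
--     (b0, b1) = b
--     real = (a0*b0 - a1*b1) % p
--     imag = (a0*b1 + a1*b0) % p
--     return (real, imag)
--
-- def sqr_fp2(a, p):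
--     """
--     Square an element a in F_{p^2}.
--     Equivalent to mul_fp2(a, a, p).
--     """
--     return mul_fp2(a, a, p)
--
-- def eq_fp2(a, b):
--     """
--     Return True iff a == b as F_{p^2} elements.
--     """
--     return a[0] == b[0] and a[1] == b[1]
--
-- def sqrt_fp2_all(z, p):
--     """
--     Return all y in F_{p^2} such that y^2 = z.
--
--     We brute force:
--       y = (c,d) with c,d in 0..p-1
--       check (c,d)^2 == z using sqr_fp2.
--
--     This is fine for tiny p like 23.
--     """
--     sols = []
--     (z0, z1) = z
--     for c in range(p):
--         for d in range(p):
--             y = (c, d)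
--             y2 = sqr_fp2(y, p)
--             if y2[0] == z0 and y2[1] == z1:
--                 sols.append(y)
--     # de-duplicate +/-y (not strictly necessary, but nice)
--     uniq = []
--     for y in sols:
--         if not any(eq_fp2(y, u) for u in uniq):
--             uniq.append(y)
--     return uniq
-- ===== SOURCE B (Python) =====
-- def sqrt_fp2_all(z, p):
--     """All y=(c,d) in F_{p^2} with y^2 = z, via a precomputed square-root
--     table of F_p: O(p) dict build + O(p) scan instead of the O(p^2) double loop."""
--     (z0, z1) = z
--     if not (0 <= z0 < p and 0 <= z1 < p):
--         return []
--     roots = {}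
--     for d in range(p):
--         k = d * d % p
--         roots[k] = roots.get(k, []) + [d]
--     out = []
--     for c in range(p):
--         for d in roots.get((c * c - z0) % p, []):
--             if 2 * c * d % p == z1:
--                 out.append((c, d))
--     return out
-- ===== Notes on version B (the rewrite author's own statement) =====
-- stated objective: faster
-- what changed: B replaces A's O(p^2) pairwise brute force plus quadratic de-duplication by one O(p) pass that builds a dict mapping each square d*d%p to its list of roots d, then a single O(p) scan over c looking up the candidates d with d^2 = c^2 - z0 and checking 2cd = z1; a reduced-input guard replaces the search entirely when z is not a canonical residue pair.
import Mathlib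
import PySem

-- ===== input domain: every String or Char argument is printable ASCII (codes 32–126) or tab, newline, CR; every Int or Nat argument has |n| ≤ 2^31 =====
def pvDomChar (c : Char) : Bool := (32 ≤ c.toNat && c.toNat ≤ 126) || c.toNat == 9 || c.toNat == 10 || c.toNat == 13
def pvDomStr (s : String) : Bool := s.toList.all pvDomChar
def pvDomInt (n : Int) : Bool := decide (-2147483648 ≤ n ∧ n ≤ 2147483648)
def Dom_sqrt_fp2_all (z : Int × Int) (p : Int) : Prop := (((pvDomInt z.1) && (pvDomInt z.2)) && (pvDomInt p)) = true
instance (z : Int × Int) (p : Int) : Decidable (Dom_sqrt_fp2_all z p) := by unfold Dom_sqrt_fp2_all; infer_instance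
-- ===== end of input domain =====

-- B replaces A's O(p^2) double loop + quadratic de-duplication by a precomputed
-- square table of F_p (one dict build) followed by a single scan over c (faster).

-- ===== PORT A =====
def mul_fp2 (a b : Int × Int) (p : Int) : Int × Int :=
  (PySem.Int.mod (a.1 * b.1 - a.2 * b.2) p, PySem.Int.mod (a.1 * b.2 + a.2 * b.1) p)

def sqr_fp2 (a : Int × Int) (p : Int) : Int × Int := mul_fp2 a a p

def eq_fp2 (a b : Int × Int) : Bool := a.1 == b.1 && a.2 == b.2

def sqrt_fp2_all (z : Int × Int) (p : Int) : List (Int × Int) :=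
  let z0 := z.1
  let z1 := z.2
  let sols := (PySem.List.pyRange 0 p 1).foldl (fun acc c =>
    (PySem.List.pyRange 0 p 1).foldl (fun acc d =>
      let y := (c, d)
      let y2 := sqr_fp2 y p
      if y2.1 == z0 && y2.2 == z1 then acc ++ [y] else acc) acc) []
  sols.foldl (fun uniq y =>
    if uniq.any (fun u => eq_fp2 y u) then uniq else uniq ++ [y]) []

-- ===== PORT B =====
def sqrt_fp2_all_alt (z : Int × Int) (p : Int) : List (Int × Int) :=
  let z0 := z.1
  let z1 := z.2
  if 0 ≤ z0 ∧ z0 < p ∧ 0 ≤ z1 ∧ z1 < p then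
    let roots := (PySem.List.pyRange 0 p 1).foldl
      (fun (roots : PySem.Dict Int (List Int)) d =>
        let k := PySem.Int.mod (d * d) p
        roots.modify k [] (fun l => l ++ [d])) PySem.Dict.empty
    (PySem.List.pyRange 0 p 1).foldl (fun out c =>
      (roots.getD (PySem.Int.mod (c * c - z0) p) []).foldl (fun out d =>
        if PySem.Int.mod (2 * c * d) p == z1 then out ++ [(c, d)] else out) out) []
  else []

-- ===== PRECONDITION & SPEC =====
def Spec_sqrt_fp2_all (z : Int × Int) (p : Int) (out : List (Int × Int)) : Prop := out = sqrt_fp2_all_alt z p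
instance (z : Int × Int) (p : Int) (out : List (Int × Int)) : Decidable (Spec_sqrt_fp2_all z p out) := by unfold Spec_sqrt_fp2_all; infer_instance

-- ===== CLAIM (what is proved, stated in full; the proofs are below) =====
def Claim_equal_sqrt_fp2_all : Prop := ∀ (z : Int × Int) (p : Int), Dom_sqrt_fp2_all z p → Spec_sqrt_fp2_all z p (sqrt_fp2_all z p)

-- ===== LEMMAS AND PROOFS =====

-- A's brute-force condition on a pair (c, d).
def pvCondA (z0 z1 p c d : Int) : Bool :=
  (PySem.Int.mod (c * c - d * d) p == z0) && (PySem.Int.mod (c * d + d * c) p == z1)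

-- A's collected solution list as a flatMap of filters.
theorem pvSolsA_eq (z0 z1 p : Int) :
    ((PySem.List.pyRange 0 p 1).foldl (fun acc c =>
      (PySem.List.pyRange 0 p 1).foldl (fun acc d =>
        if PySem.Int.mod (c * c - d * d) p == z0 && PySem.Int.mod (c * d + d * c) p == z1 then
          acc ++ [(c, d)]
        else acc) acc) [])
    = (PySem.List.pyRange 0 p 1).flatMap (fun c =>
        ((PySem.List.pyRange 0 p 1).filter (pvCondA z0 z1 p c)).map (fun d => (c, d))) := by
  have h : (fun (acc : List (Int × Int)) (c : Int) =>
      (PySem.List.pyRange 0 p 1).foldl (fun acc d =>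
        let y := (c, d)
        let y2 := sqr_fp2 y p
        if y2.1 == z0 && y2.2 == z1 then acc ++ [y] else acc) acc)
      = fun acc c => acc ++ ((PySem.List.pyRange 0 p 1).filter (pvCondA z0 z1 p c)).map (fun d => (c, d)) := by
    funext acc c
    exact PySem.List.foldl_append_if (pvCondA z0 z1 p c) (fun d => (c, d)) _ _
  rw [show (fun acc c => (PySem.List.pyRange 0 p 1).foldl (fun acc d =>
        if PySem.Int.mod (c * c - d * d) p == z0 && PySem.Int.mod (c * d + d * c) p == z1 then
          acc ++ [(c, d)]
        else acc) acc) = (fun (acc : List (Int × Int)) (c : Int) => acc ++ ((PySem.List.pyRange 0 p 1).filter (pvCondA z0 z1 p c)).map (fun d => (c, d))) from h,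
    PySem.List.foldl_append_eq_flatMap]
  simp

-- A itself, through pvSolsA_eq (rfl bridges the helper/projection unfolding).
theorem pvA_eq (z0 z1 p : Int) :
    sqrt_fp2_all (z0, z1) p
      = ((PySem.List.pyRange 0 p 1).flatMap (fun c =>
          ((PySem.List.pyRange 0 p 1).filter (pvCondA z0 z1 p c)).map (fun d => (c, d)))).foldl
          (fun uniq y => if uniq.any (fun u => eq_fp2 y u) then uniq else uniq ++ [y]) [] := by
  rw [← pvSolsA_eq]
  rfl

-- The square table looked up at r is the filter of range p by d*d % p == r.
theorem pvRoots_getD (p r : Int) :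
    (((PySem.List.pyRange 0 p 1).foldl
      (fun (roots : PySem.Dict Int (List Int)) d =>
        roots.modify (PySem.Int.mod (d * d) p) [] (fun l => l ++ [d])) PySem.Dict.empty).getD r [])
    = (PySem.List.pyRange 0 p 1).filter (fun d => PySem.Int.mod (d * d) p == r) := by
  have h : ((PySem.List.pyRange 0 p 1).foldl
      (fun (roots : PySem.Dict Int (List Int)) d =>
        roots.modify (PySem.Int.mod (d * d) p) [] (fun l => l ++ [d])) PySem.Dict.empty)
      = (((PySem.List.pyRange 0 p 1).map (fun d => (PySem.Int.mod (d * d) p, d))).foldl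
          (fun (roots : PySem.Dict Int (List Int)) q =>
            roots.modify q.1 [] (fun l => l ++ [q.2])) PySem.Dict.empty) := by
    rw [List.foldl_map]
  rw [h, PySem.Dict.getD_foldl_modify_append]
  simp [List.filter_map, Function.comp_def]

-- De-duplication is the identity on a Nodup list.
theorem pvDedup_nodup (l : List (Int × Int)) (hl : l.Nodup) (u : List (Int × Int))
    (hu : ∀ y ∈ l, y ∉ u) :
    l.foldl (fun uniq y => if uniq.any (fun v => eq_fp2 y v) then uniq else uniq ++ [y]) u
      = u ++ l := by
  induction l generalizing u with
  | nil => simp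
  | cons y t ih =>
    have hy : (u.any (fun v => eq_fp2 y v)) = false := by
      rw [List.any_eq_false]
      intro v hv
      have : y ∉ u := hu y (List.mem_cons_self)
      simp only [eq_fp2, Bool.and_eq_true, beq_iff_eq, not_and]
      intro h1 h2
      exact this ((Prod.ext h1 h2) ▸ hv)
    simp only [List.foldl_cons, hy, Bool.false_eq_true, if_false]
    rw [ih hl.of_cons (u ++ [y]) ?_]
    · simp
    · intro x hx
      simp only [List.mem_append, List.mem_singleton]
      rintro (h | rfl)
      · exact hu x (List.mem_cons_of_mem _ hx) h
      · exact (List.nodup_cons.mp hl).1 hx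

-- A's solution list has no duplicates.
theorem pvSols_nodup (z0 z1 p : Int) :
    ((PySem.List.pyRange 0 p 1).flatMap (fun c =>
      ((PySem.List.pyRange 0 p 1).filter (pvCondA z0 z1 p c)).map (fun d => (c, d)))).Nodup := by
  rw [List.nodup_flatMap]
  constructor
  · intro c _
    exact ((PySem.List.nodup_pyRange_one 0 p).filter _).map
      (fun a b h => by simpa using congrArg Prod.snd h)
  · refine (PySem.List.pairwise_lt_pyRange_one 0 p).imp ?_
    intro a b hab x hxa hxb
    simp only [List.mem_map, List.mem_filter] at hxa hxb
    obtain ⟨d1, _, rfl⟩ := hxa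
    obtain ⟨d2, _, h⟩ := hxb
    exact absurd (congrArg Prod.fst h).symm (by simpa using hab.ne)

-- The arithmetic pivot: for 0 ≤ z0 < p, (c²−d²) % p = z0 ⟺ d² % p = (c²−z0) % p.
theorem pvMod_shift (p z0 c d : Int) (h0 : 0 ≤ z0) (h1 : z0 < p) :
    ((c * c - d * d) % p = z0) ↔ ((d * d) % p = (c * c - z0) % p) := by
  have hz : z0 % p = z0 := Int.emod_eq_of_lt h0 h1
  conv_lhs => rw [← hz]
  rw [Int.emod_eq_emod_iff_emod_sub_eq_zero, Int.emod_eq_emod_iff_emod_sub_eq_zero,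
    PySem.Int.emod_eq_zero_iff_dvd, PySem.Int.emod_eq_zero_iff_dvd,
    show d * d - (c * c - z0) = -(c * c - d * d - z0) by ring, dvd_neg]

-- B's scan as a flatMap of filters (generic in the looked-up list L c).
theorem pvFoldB (z1 p : Int) (L : Int → List Int) :
    ((PySem.List.pyRange 0 p 1).foldl (fun out c =>
      (L c).foldl (fun out d =>
        if PySem.Int.mod (2 * c * d) p == z1 then out ++ [(c, d)] else out) out) [])
    = (PySem.List.pyRange 0 p 1).flatMap (fun c =>
        ((L c).filter (fun d => PySem.Int.mod (2 * c * d) p == z1)).map (fun d => (c, d))) := by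
  have h : (fun (out : List (Int × Int)) (c : Int) =>
      (L c).foldl (fun out d =>
        if PySem.Int.mod (2 * c * d) p == z1 then out ++ [(c, d)] else out) out)
      = fun out c => out ++ ((L c).filter (fun d => PySem.Int.mod (2 * c * d) p == z1)).map (fun d => (c, d)) := by
    funext out c
    exact PySem.List.foldl_append_if _ (fun d => (c, d)) _ _
  rw [h, PySem.List.foldl_append_eq_flatMap]
  simp

-- Pointwise agreement of the two tests when 0 ≤ z0 < p and z1 is arbitrary.
theorem pvCond_eq (z0 z1 p : Int) (h0 : 0 ≤ z0) (h1 : z0 < p) (c d : Int) :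
    pvCondA z0 z1 p c d
      = ((PySem.Int.mod (2 * c * d) p == z1) &&
         (PySem.Int.mod (d * d) p == PySem.Int.mod (c * c - z0) p)) := by
  have hp : 0 < p := lt_of_le_of_lt h0 h1
  simp only [pvCondA, PySem.Int.mod_eq_emod_of_pos hp,
    show c * d + d * c = 2 * c * d by ring]
  rw [Bool.and_comm]
  congr 1
  rw [Bool.eq_iff_iff]
  simp only [beq_iff_eq]
  exact pvMod_shift p z0 c d h0 h1

theorem pvMain (z0 z1 p : Int) :
    sqrt_fp2_all (z0, z1) p = sqrt_fp2_all_alt (z0, z1) p := by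
  by_cases hg : 0 ≤ z0 ∧ z0 < p ∧ 0 ≤ z1 ∧ z1 < p
  · rw [pvA_eq, pvDedup_nodup _ (pvSols_nodup z0 z1 p) [] (by simp)]
    simp only [sqrt_fp2_all_alt, if_pos hg]
    rw [pvFoldB z1 p, List.nil_append]
    simp only [pvRoots_getD, List.filter_filter]
    refine congrArg (fun g : Int → List (Int × Int) =>
      List.flatMap g (PySem.List.pyRange 0 p 1)) (funext fun c => ?_)
    rw [List.filter_congr (fun d _ => (pvCond_eq z0 z1 p hg.1 hg.2.1 c d))]
  · rw [pvA_eq]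
    simp only [sqrt_fp2_all_alt, if_neg hg]
    have hnil : ((PySem.List.pyRange 0 p 1).flatMap (fun c =>
        ((PySem.List.pyRange 0 p 1).filter (pvCondA z0 z1 p c)).map (fun d => (c, d)))) = [] := by
      by_cases hp' : p ≤ 0
      · rw [PySem.List.pyRange_one_eq_nil hp']; simp
      · have hp : 0 < p := by omega
        have hfalse : ∀ c d : Int, pvCondA z0 z1 p c d = false := by
          intro c d
          have hpne : p ≠ 0 := by omega
          have b1 := Int.emod_nonneg (c * c - d * d) hpne
          have b2 := Int.emod_lt_of_pos (c * c - d * d) hp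
          have b3 := Int.emod_nonneg (c * d + d * c) hpne
          have b4 := Int.emod_lt_of_pos (c * d + d * c) hp
          simp only [pvCondA, PySem.Int.mod_eq_emod_of_pos hp, Bool.and_eq_false_iff,
            beq_eq_false_iff_ne, ne_eq]
          omega
        apply List.flatMap_eq_nil_iff.mpr
        intro c _
        rw [List.filter_congr (fun d _ => hfalse c d)]
        simp
    rw [hnil]
    simp

-- ===== VERDICT (by name: the statement is the Claim_ definition above) =====
theorem sqrt_fp2_all_spec : Claim_equal_sqrt_fp2_all := by
  intro z p _
  obtain ⟨z0, z1⟩ := z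
  exact pvMain z0 z1 p
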